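-- pv_equiv track=rewrite | github.com/tristanmanchester/tomojax | src/tomojax/data/preprocess.py | _view_tokens_from_text
-- ===== SOURCE A (Python) =====
-- def _view_tokens_from_text(text: str) -> list[str]:
--     tokens: list[str] = []
--     for line in str(text).splitlines():
--         line = line.split("#", 1)[0]
--         if not line.strip():
--             continue
--         tokens.extend(part for part in line.replace(",", " ").split() if part)
--     return tokens
-- ===== SOURCE B (Python) =====
-- def _view_tokens_from_text(text: str) -> list[str]:
--     # Single-pass character state machine: a comment flag reset at line
--     # boundaries and a token buffer flushed at delimiters.
--     tokens: list[str] = []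
--     buf: list[str] = []
--     in_comment = False
--     for ch in str(text):
--         if ch in "\n\r\v\f\x1c\x1d\x1e\x85\u2028\u2029":
--             if buf:
--                 tokens.append("".join(buf))
--                 buf = []
--             in_comment = False
--         elif in_comment:
--             pass
--         elif ch == "#":
--             if buf:
--                 tokens.append("".join(buf))
--                 buf = []
--             in_comment = True
--         elif ch == "," or ch.isspace():
--             if buf:
--                 tokens.append("".join(buf))
--                 buf = []
--         else:
--             buf.append(ch)
--     if buf:
--         tokens.append("".join(buf))
--     return tokens
-- ===== Notes on version B (the rewrite author's own statement) =====
-- stated objective: alternative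
-- what changed: A builds a list of lines with splitlines, strips the trailing comment of each line, skips blank lines and splits each cleaned line into fragments; B never materialises lines or fragments: it runs one character-level state machine over the text (a comment flag reset at line boundaries plus a token buffer flushed at delimiters) appending tokens as it goes.
import Mathlib
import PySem

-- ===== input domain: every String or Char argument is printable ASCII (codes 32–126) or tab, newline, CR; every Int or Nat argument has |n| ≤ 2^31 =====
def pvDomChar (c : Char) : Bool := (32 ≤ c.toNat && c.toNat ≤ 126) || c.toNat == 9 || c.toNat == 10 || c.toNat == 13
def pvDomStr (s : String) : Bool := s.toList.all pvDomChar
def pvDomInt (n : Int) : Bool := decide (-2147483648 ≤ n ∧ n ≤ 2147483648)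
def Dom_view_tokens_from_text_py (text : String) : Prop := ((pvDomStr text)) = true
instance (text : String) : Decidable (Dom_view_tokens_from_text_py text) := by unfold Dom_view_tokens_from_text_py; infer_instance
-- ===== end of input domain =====

-- B replaces A's splitlines/split-per-line pipeline by a single character-level state
-- machine (comment flag reset at line boundaries + a token buffer flushed at delimiters);
-- objective: alternative (one pass over characters, no intermediate line/fragment lists).

-- ===== PORT A =====
-- line.split("#", 1)[0]
def pvStripComment (line : String) : String :=
  match PySem.Str.splitMax? line "#" 1 with
  | some (h :: _) => h
  | _ => ""

def view_tokens_from_text_py (text : String) : List String :=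
  (PySem.Str.splitlines text).foldl
    (fun tokens line0 =>
      let line := pvStripComment line0
      if PySem.Str.strip line = "" then tokens
      else tokens ++ (PySem.Str.split₀ (PySem.Str.replace line "," " ")).filter (fun part => part != ""))
    []

-- ===== PORT B =====
-- ch in "\n\r\v\f\x1c\x1d\x1e\x85\u2028\u2029"
def pvLineEnd (ch : Char) : Bool :=
  ("\n\r\x0b\x0c\x1c\x1d\x1e\x85\u2028\u2029".toList).contains ch

def view_tokens_from_text_py_alt (text : String) : List String :=
  let fin := text.toList.foldl
    (fun (s : List String × List Char × Bool) ch =>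
      let tokens := s.1
      let buf := s.2.1
      let in_comment := s.2.2
      if pvLineEnd ch then
        ((if buf.isEmpty then tokens else tokens ++ [String.ofList buf]), [], false)
      else if in_comment then s
      else if ch = '#' then
        ((if buf.isEmpty then tokens else tokens ++ [String.ofList buf]), [], true)
      else if ch = ',' || PySem.Chars.isspace ch then
        ((if buf.isEmpty then tokens else tokens ++ [String.ofList buf]), [], in_comment)
      else (tokens, buf ++ [ch], in_comment))
    ([], [], false)
  if fin.2.1.isEmpty then fin.1 else fin.1 ++ [String.ofList fin.2.1]

-- ===== PRECONDITION & SPEC =====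
def Spec_view_tokens_from_text_py (text : String) (out : List String) : Prop := out = view_tokens_from_text_py_alt text
instance (text : String) (out : List String) : Decidable (Spec_view_tokens_from_text_py text out) := by unfold Spec_view_tokens_from_text_py; infer_instance

-- ===== CLAIM (what is proved, stated in full; the proofs are below) =====
def Claim_equal_view_tokens_from_text_py : Prop := ∀ (text : String), Dom_view_tokens_from_text_py text → Spec_view_tokens_from_text_py text (view_tokens_from_text_py text)

-- ===== LEMMAS AND PROOFS =====

-- the comma→space substitution, as a character map
def pvR (c : Char) : Char := if c = ',' then ' ' else c

-- the line-boundary test of Chars.splitlines, as a named function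
def pvIsB (c : Char) : Bool :=
  have n := c.toNat
  decide (n = 10) || decide (n = 13) || decide (n = 11) || decide (n = 12) || decide (n = 28) ||
    decide (n = 29) || decide (n = 30) || decide (n = 133) || decide (n = 8232) || decide (n = 8233)

-- reference recursion mirroring B's fold step (char-list tokens)
def pvTok : List Char → List Char → Bool → List (List Char)
  | [], buf, _ => if buf.isEmpty then [] else [buf]
  | c :: cs, buf, inC =>
    if pvLineEnd c then (if buf.isEmpty then [] else [buf]) ++ pvTok cs [] false
    else if inC then pvTok cs buf inC
    else if c = '#' then (if buf.isEmpty then [] else [buf]) ++ pvTok cs [] true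
    else if c = ',' || PySem.Chars.isspace c then (if buf.isEmpty then [] else [buf]) ++ pvTok cs [] inC
    else pvTok cs (buf ++ [c]) inC

-- per-line tokens, char level
def pvG (l : List Char) : List (List Char) :=
  PySem.Chars.split₀ ((l.takeWhile (· ≠ '#')).map pvR)

-- A's whole result, char level
def pvF (cs : List Char) : List (List Char) :=
  (PySem.Chars.splitlines cs).flatMap pvG

-- head line, the line separator skip, and the remainder after the first separator
def pvHead (cs : List Char) : List Char := cs.takeWhile (fun c => !pvIsB c)
def pvSep : List Char → List Char
  | '\r' :: '\n' :: r => r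
  | _ :: r => r
  | [] => []
def pvAfter (cs : List Char) : List Char := pvSep (cs.dropWhile (fun c => !pvIsB c))

lemma pv_beq_toNat (c d : Char) : (c == d) = decide (c.toNat = d.toNat) := by
  have h : (c = d) ↔ c.toNat = d.toNat := ⟨fun h => h ▸ rfl, fun h => Char.ext (UInt32.toNat_inj.mp h)⟩
  show decide (c = d) = _
  exact decide_eq_decide.mpr h

lemma pv_lineEnd_eq (c : Char) : pvLineEnd c = pvIsB c := by
  unfold pvLineEnd pvIsB
  rw [show ("\n\r\x0b\x0c\x1c\x1d\x1e\x85\u2028\u2029".toList)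
      = ['\n', '\r', '\x0b', '\x0c', '\x1c', '\x1d', '\x1e', '\x85', '\u2028', '\u2029'] from rfl]
  simp only [List.contains_cons, List.contains_nil, pv_beq_toNat, Bool.or_false, Bool.or_assoc]
  rfl

-- ==== splitlines recursion ====

lemma pv_sl_go_nil (cur acc) : PySem.Chars.splitlines.go pvIsB [] cur acc =
    if cur.isEmpty then acc.reverse else (cur.reverse :: acc).reverse := by
  rw [PySem.Chars.splitlines.go]

lemma pv_sl_go_rn (r : List Char) (cur acc) :
    PySem.Chars.splitlines.go pvIsB ('\r' :: '\n' :: r) cur acc =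
      PySem.Chars.splitlines.go pvIsB r [] (cur.reverse :: acc) := by
  rw [PySem.Chars.splitlines.go]

lemma pv_sl_go_cons (c : Char) (r : List Char) (cur acc)
    (h2 : c = '\r' → ∀ r', r ≠ '\n' :: r') :
    PySem.Chars.splitlines.go pvIsB (c :: r) cur acc =
      if pvIsB c then PySem.Chars.splitlines.go pvIsB r [] (cur.reverse :: acc)
      else PySem.Chars.splitlines.go pvIsB r (c :: cur) acc := by
  rw [PySem.Chars.splitlines.go.eq_def]
  split
  · rename_i heq; exact absurd heq (by simp)
  · rename_i rest heq
    have h1 : c = '\r' := by injection heq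
    have hr : r = '\n' :: rest := by injection heq with _ h
    exact absurd hr (h2 h1 rest)
  · rename_i ch tl hno heq
    have h1 : c = ch := by injection heq
    have hr : r = tl := by injection heq with _ h
    subst h1; subst hr
    rfl

lemma pv_sep_cons (c : Char) (r : List Char) (h2 : c = '\r' → ∀ r', r ≠ '\n' :: r') :
    pvSep (c :: r) = r := by
  rw [pvSep.eq_def]
  split
  · rename_i rest heq
    have h1 : c = '\r' := by injection heq
    have hr : r = '\n' :: rest := by injection heq with _ h
    exact absurd hr (h2 h1 rest)
  · rename_i ch tl hno heq
    have hr : r = tl := by injection heq with _ h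
    exact hr ▸ rfl
  · rename_i heq; exact absurd heq (by simp)

lemma pv_sl_go_acc' : ∀ (n : Nat) (cs : List Char), cs.length ≤ n → ∀ cur acc,
    PySem.Chars.splitlines.go pvIsB cs cur acc =
      acc.reverse ++ PySem.Chars.splitlines.go pvIsB cs cur [] := by
  intro n
  induction n with
  | zero =>
    intro cs hn cur acc
    have : cs = [] := List.length_eq_zero_iff.mp (Nat.le_zero.mp hn)
    subst this
    by_cases h : cur.isEmpty <;> simp [pv_sl_go_nil, h]
  | succ n ih =>
    intro cs hn cur acc
    cases cs with
    | nil => by_cases h : cur.isEmpty <;> simp [pv_sl_go_nil, h]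
    | cons c r =>
      by_cases hrn : c = '\r' ∧ ∃ r', r = '\n' :: r'
      · obtain ⟨rfl, r', rfl⟩ := hrn
        rw [pv_sl_go_rn, pv_sl_go_rn,
          ih r' (by simp at hn; omega) [] (cur.reverse :: acc),
          ih r' (by simp at hn; omega) [] [cur.reverse]]
        simp
      · have h2 : c = '\r' → ∀ r', r ≠ '\n' :: r' := by
          intro hc r' hr; exact hrn ⟨hc, r', hr⟩
        rw [pv_sl_go_cons c r cur acc h2, pv_sl_go_cons c r cur [] h2]
        by_cases hb : pvIsB c
        · rw [if_pos hb, if_pos hb,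
            ih r (by simpa using hn) [] (cur.reverse :: acc),
            ih r (by simpa using hn) [] [cur.reverse]]
          simp
        · rw [if_neg hb, if_neg hb, ih r (by simpa using hn) (c :: cur) acc]

lemma pv_sl_go_acc (cs : List Char) (cur acc) :
    PySem.Chars.splitlines.go pvIsB cs cur acc =
      acc.reverse ++ PySem.Chars.splitlines.go pvIsB cs cur [] :=
  pv_sl_go_acc' cs.length cs le_rfl cur acc

lemma pv_sl_go_split (cs : List Char) (h : cs ≠ []) : ∀ cur acc,
    PySem.Chars.splitlines.go pvIsB cs cur acc =
      acc.reverse ++ (cur.reverse ++ pvHead cs) :: PySem.Chars.splitlines.go pvIsB (pvAfter cs) [] [] := by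
  induction cs with
  | nil => exact absurd rfl h
  | cons c r ih =>
    intro cur acc
    by_cases hrn : c = '\r' ∧ ∃ r', r = '\n' :: r'
    · obtain ⟨rfl, r', rfl⟩ := hrn
      rw [pv_sl_go_rn, pv_sl_go_acc]
      have hh : pvHead ('\r' :: '\n' :: r') = [] := by
        simp [pvHead, show pvIsB '\r' = true from rfl]
      have ha : pvAfter ('\r' :: '\n' :: r') = r' := by
        simp [pvAfter, show pvIsB '\r' = true from rfl, pvSep]
      rw [hh, ha]
      simp
    · have h2 : c = '\r' → ∀ r', r ≠ '\n' :: r' := fun hc r' hr => hrn ⟨hc, r', hr⟩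
      rw [pv_sl_go_cons c r cur acc h2]
      by_cases hb : pvIsB c
      · rw [if_pos hb, pv_sl_go_acc]
        have hh : pvHead (c :: r) = [] := by simp [pvHead, hb]
        have ha : pvAfter (c :: r) = r := by
          simp only [pvAfter, List.dropWhile_cons, hb, Bool.not_true, Bool.false_eq_true, if_false]
          exact pv_sep_cons c r h2
        rw [hh, ha]
        simp
      · rw [if_neg hb]
        have hh : pvHead (c :: r) = c :: pvHead r := by simp [pvHead, hb]
        have ha : pvAfter (c :: r) = pvAfter r := by
          simp [pvAfter, hb]
        cases r with
        | nil =>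
          rw [pv_sl_go_nil]
          have hh1 : pvHead [c] = [c] := by simp [pvHead, hb]
          have ha1 : pvAfter [c] = [] := by simp [pvAfter, hb, pvSep]
          rw [hh1, ha1, pv_sl_go_nil]
          simp
        | cons d r' =>
          rw [ih (by simp) (c :: cur) acc, hh, ha]
          simp

lemma pv_splitlines_def (cs : List Char) :
    PySem.Chars.splitlines cs = PySem.Chars.splitlines.go pvIsB cs [] [] := rfl

lemma pv_splitlines_split (cs : List Char) (h : cs ≠ []) :
    PySem.Chars.splitlines cs = pvHead cs :: PySem.Chars.splitlines (pvAfter cs) := by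
  rw [pv_splitlines_def, pv_sl_go_split cs h [] [], pv_splitlines_def]
  rfl

lemma pvF_nil : pvF [] = [] := rfl

lemma pvG_nil : pvG [] = [] := rfl

lemma pvF_split (cs : List Char) (h : cs ≠ []) : pvF cs = pvG (pvHead cs) ++ pvF (pvAfter cs) := by
  unfold pvF; rw [pv_splitlines_split cs h]; simp

lemma pvF_head_after (cs : List Char) : pvG (pvHead cs) ++ pvF (pvAfter cs) = pvF cs := by
  cases cs with
  | nil => simp [pvG_nil, pvF_nil, pvHead, pvAfter, pvSep]
  | cons c r => exact (pvF_split (c :: r) (by simp)).symm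

-- ==== replace = map pvR ====

lemma pv_repl_go (l : List Char) : ∀ (fuel : Nat) (acc : List Char), l.length ≤ fuel →
    PySem.Chars.replace.go [','] [' '] fuel l acc = acc.reverse ++ l.map pvR := by
  induction l with
  | nil =>
    intro fuel acc _
    cases fuel <;> simp [PySem.Chars.replace.go]
  | cons c t ih =>
    intro fuel acc hf
    cases fuel with
    | zero => simp at hf
    | succ f =>
      by_cases hc : c = ','
      · subst hc
        simp only [PySem.Chars.replace.go, List.isPrefixOf, BEq.rfl, Bool.true_and, if_true]
        rw [show List.drop [','].length (',' :: t) = t from rfl,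
          show [' '].reverse ++ acc = ' ' :: acc from rfl,
          ih f (' ' :: acc) (by simpa using hf)]
        simp [pvR]
      · have hp : [','].isPrefixOf (c :: t) = false := by
          simp [List.isPrefixOf]
          intro h; exact absurd h.symm hc
        simp only [PySem.Chars.replace.go, hp, Bool.false_eq_true, if_false]
        rw [ih f (c :: acc) (by simpa using hf)]
        simp [pvR, hc]

lemma pv_replace_eq_map (s : List Char) : PySem.Chars.replace s [','] [' '] = s.map pvR := by
  simp only [PySem.Chars.replace, List.isEmpty_cons, Bool.false_eq_true, if_false]
  simpa using pv_repl_go s s.length [] le_rfl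

-- ==== split₀ lemmas ====

lemma pv_split0_go_acc (s : List Char) : ∀ (cur : List Char) (acc : List (List Char)),
    PySem.Chars.split₀.go s cur acc = acc.reverse ++ PySem.Chars.split₀.go s cur [] := by
  induction s with
  | nil =>
    intro cur acc
    by_cases h : cur.isEmpty <;> simp [PySem.Chars.split₀.go, h]
  | cons c rest ih =>
    intro cur acc
    by_cases hs : PySem.Chars.isspace c
    · by_cases h : cur.isEmpty
      · simp only [PySem.Chars.split₀.go, hs, h, if_true]
        rw [ih [] acc]
      · simp only [PySem.Chars.split₀.go, hs, h, if_true, Bool.false_eq_true, if_false]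
        rw [ih [] (cur.reverse :: acc), ih [] [cur.reverse]]
        simp
    · simp only [PySem.Chars.split₀.go, hs, Bool.false_eq_true, if_false]
      rw [ih (c :: cur) acc]

lemma pv_split0_go_append_space {sp : Char} (hsp : PySem.Chars.isspace sp = true) (b : List Char) :
    ∀ (a cur : List Char), PySem.Chars.split₀.go (a ++ sp :: b) cur [] =
      PySem.Chars.split₀.go a cur [] ++ PySem.Chars.split₀.go b [] [] := by
  intro a
  induction a with
  | nil =>
    intro cur
    by_cases h : cur.isEmpty
    · simp [PySem.Chars.split₀.go, hsp, h]
    · simp only [List.nil_append, PySem.Chars.split₀.go, hsp, h, if_true, Bool.false_eq_true,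
        if_false]
      rw [pv_split0_go_acc b [] [cur.reverse]]
  | cons c a' ih =>
    intro cur
    by_cases hs : PySem.Chars.isspace c
    · by_cases h : cur.isEmpty
      · simp only [List.cons_append, PySem.Chars.split₀.go, hs, h, if_true]
        exact ih []
      · simp only [List.cons_append, PySem.Chars.split₀.go, hs, h, if_true, Bool.false_eq_true,
          if_false]
        rw [pv_split0_go_acc (a' ++ sp :: b) [] [cur.reverse],
          pv_split0_go_acc a' [] [cur.reverse], ih []]
        simp
    · simp only [List.cons_append, PySem.Chars.split₀.go, hs, Bool.false_eq_true, if_false]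
      exact ih (c :: cur)

lemma pv_split0_append_space {sp : Char} (hsp : PySem.Chars.isspace sp = true) (a b : List Char) :
    PySem.Chars.split₀ (a ++ sp :: b) = PySem.Chars.split₀ a ++ PySem.Chars.split₀ b :=
  pv_split0_go_append_space hsp b a []

lemma pv_split0_go_ne_nil (s : List Char) : ∀ (cur : List Char) (acc : List (List Char)),
    (∀ x ∈ acc, x ≠ []) → ∀ x ∈ PySem.Chars.split₀.go s cur acc, x ≠ [] := by
  induction s with
  | nil =>
    intro cur acc hacc x hx
    by_cases h : cur.isEmpty
    · simp only [PySem.Chars.split₀.go, h, if_true, List.mem_reverse] at hx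
      exact hacc x hx
    · simp only [PySem.Chars.split₀.go, h, Bool.false_eq_true, if_false, List.mem_reverse,
        List.mem_cons] at hx
      rcases hx with hx | hx
      · subst hx; simp only [ne_eq, List.reverse_eq_nil_iff]
        intro hnil; subst hnil; simp at h
      · exact hacc x hx
  | cons c rest ih =>
    intro cur acc hacc x hx
    by_cases hs : PySem.Chars.isspace c
    · by_cases h : cur.isEmpty
      · simp only [PySem.Chars.split₀.go, hs, h, if_true] at hx
        exact ih [] acc hacc x hx
      · simp only [PySem.Chars.split₀.go, hs, h, if_true, Bool.false_eq_true, if_false] at hx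
        refine ih [] (cur.reverse :: acc) ?_ x hx
        intro y hy
        rcases List.mem_cons.mp hy with hy | hy
        · subst hy; simp only [ne_eq, List.reverse_eq_nil_iff]
          intro hnil; subst hnil; simp at h
        · exact hacc y hy
    · simp only [PySem.Chars.split₀.go, hs, Bool.false_eq_true, if_false] at hx
      exact ih (c :: cur) acc hacc x hx

lemma pv_split0_go_all_space (s : List Char) (hs : ∀ c ∈ s, PySem.Chars.isspace c = true) :
    ∀ acc, PySem.Chars.split₀.go s [] acc = acc.reverse := by
  induction s with
  | nil => intro acc; simp [PySem.Chars.split₀.go]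
  | cons c rest ih =>
    intro acc
    have hc : PySem.Chars.isspace c = true := hs c (by simp)
    simp only [PySem.Chars.split₀.go, hc, if_true, List.isEmpty_nil]
    exact ih (fun d hd => hs d (by simp [hd])) acc

lemma pv_split0_go_word (w : List Char) (hw : ∀ c ∈ w, PySem.Chars.isspace c = false) :
    ∀ cs cur acc, PySem.Chars.split₀.go (w ++ cs) cur acc =
      PySem.Chars.split₀.go cs (w.reverse ++ cur) acc := by
  induction w with
  | nil => intro cs cur acc; simp
  | cons c w' ih =>
    intro cs cur acc
    have hc : PySem.Chars.isspace c = false := hw c (by simp)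
    simp only [List.cons_append, PySem.Chars.split₀.go, hc, Bool.false_eq_true, if_false]
    rw [ih (fun d hd => hw d (by simp [hd])) cs (c :: cur) acc]
    simp

lemma pv_split0_word (w : List Char) (hw : ∀ c ∈ w, PySem.Chars.isspace c = false) :
    PySem.Chars.split₀ w = if w.isEmpty then [] else [w] := by
  have h := pv_split0_go_word w hw [] [] []
  simp only [List.append_nil] at h
  unfold PySem.Chars.split₀
  rw [h]
  by_cases hw' : w.isEmpty
  · simp [PySem.Chars.split₀.go, hw']
  · simp [PySem.Chars.split₀.go, hw']

lemma pv_strip_nil_all_space (cs : List Char) (h : PySem.Chars.strip cs = []) :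
    ∀ c ∈ cs, PySem.Chars.isspace c = true := by
  intro c hc
  simp only [PySem.Chars.strip, PySem.Chars.rstrip, PySem.Chars.lstrip,
    List.reverse_eq_nil_iff, List.dropWhile_eq_nil_iff, List.mem_reverse] at h
  have hsplit := List.takeWhile_append_dropWhile (p := PySem.Chars.isspace) (l := cs)
  rw [← hsplit] at hc
  rcases List.mem_append.mp hc with hm | hm
  · exact List.mem_takeWhile_imp hm
  · exact h c hm

lemma pv_isspace_pvR {c : Char} (h : PySem.Chars.isspace c = true) :
    PySem.Chars.isspace (pvR c) = true := by
  by_cases hc : c = ','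
  · exact absurd (hc ▸ h) (by decide)
  · simpa [pvR, hc] using h

-- per-line token list of A: the blank-line skip and the empty-part filter are vacuous
lemma pv_line_tokens (line : String) :
    (if PySem.Str.strip line = "" then ([] : List String)
     else (PySem.Str.split₀ (PySem.Str.replace line "," " ")).filter (fun part => part != "")) =
    PySem.Str.split₀ (PySem.Str.replace line "," " ") := by
  by_cases hb : PySem.Str.strip line = ""
  · have hall : ∀ c ∈ line.toList, PySem.Chars.isspace c = true := by
      apply pv_strip_nil_all_space
      have := congrArg String.toList hb
      rwa [PySem.Str.toList_strip] at this
    have hnil : PySem.Chars.split₀ (line.toList.map pvR) = [] := by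
      have : ∀ c ∈ line.toList.map pvR, PySem.Chars.isspace c = true := by
        intro c hc
        rcases List.mem_map.mp hc with ⟨d, hd, rfl⟩
        exact pv_isspace_pvR (hall d hd)
      simpa [PySem.Chars.split₀] using pv_split0_go_all_space _ this []
    rw [if_pos hb]
    symm
    simp only [PySem.Str.split₀]
    rw [PySem.Str.toList_replace, show (",".toList) = [','] from rfl,
      show (" ".toList) = [' '] from rfl, pv_replace_eq_map, hnil]
    simp
  · rw [if_neg hb]
    apply List.filter_eq_self.mpr
    intro a ha
    simp only [PySem.Str.split₀, List.mem_map] at ha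
    rcases ha with ⟨cs, hcs, rfl⟩
    have hne : cs ≠ [] :=
      pv_split0_go_ne_nil _ [] [] (by simp) cs (by simpa [PySem.Chars.split₀] using hcs)
    simp only [bne_iff_ne, ne_eq]
    intro he
    exact hne (by simpa using congrArg String.toList he)

-- ==== stripComment = takeWhile (· ≠ '#') ====

lemma pv_somax_go_zero (fuel : Nat) (l cur acc) :
    PySem.Chars.splitOnMax.go ['#'] fuel 0 l cur acc = ((cur.reverse ++ l) :: acc).reverse := by
  cases fuel with
  | zero => rfl
  | succ f => cases l <;> simp [PySem.Chars.splitOnMax.go]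

lemma pv_somax_go_one (l : List Char) : ∀ (fuel : Nat) (cur : List Char) (acc : List (List Char)),
    l.length < fuel →
    ∃ tail, PySem.Chars.splitOnMax.go ['#'] fuel 1 l cur acc =
      acc.reverse ++ (cur.reverse ++ l.takeWhile (· ≠ '#')) :: tail := by
  induction l with
  | nil =>
    intro fuel cur acc hf
    cases fuel with
    | zero => simp at hf
    | succ f => exact ⟨[], by simp [PySem.Chars.splitOnMax.go]⟩
  | cons c rest ih =>
    intro fuel cur acc hf
    cases fuel with
    | zero => simp at hf
    | succ f =>
      by_cases hc : c = '#'
      · subst hc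
        refine ⟨[rest], ?_⟩
        rw [show PySem.Chars.splitOnMax.go ['#'] (f+1) 1 ('#' :: rest) cur acc
            = PySem.Chars.splitOnMax.go ['#'] f 0 rest [] (cur.reverse :: acc) from by
          simp [PySem.Chars.splitOnMax.go, List.isPrefixOf]]
        rw [pv_somax_go_zero]
        simp
      · have hp : ['#'].isPrefixOf (c :: rest) = false := by
          simp [List.isPrefixOf]
          intro h; exact absurd h.symm hc
        obtain ⟨tail, htail⟩ := ih f (c :: cur) acc (by simpa using hf)
        refine ⟨tail, ?_⟩
        rw [show PySem.Chars.splitOnMax.go ['#'] (f+1) 1 (c :: rest) cur acc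
            = PySem.Chars.splitOnMax.go ['#'] f 1 rest (c :: cur) acc from by
          simp [PySem.Chars.splitOnMax.go, hp]]
        rw [htail]
        simp [hc]

lemma pv_stripComment_toList (line : String) :
    (pvStripComment line).toList = line.toList.takeWhile (· ≠ '#') := by
  unfold pvStripComment
  simp only [PySem.Str.splitMax?, show ("#".toList) = ['#'] from rfl]
  rw [show PySem.Chars.splitMax? line.toList ['#'] 1
      = some (PySem.Chars.splitOnMax line.toList ['#'] 1) from rfl]
  simp only [PySem.Chars.splitOnMax, show ((1 : Int) < 0) = False from by norm_num, if_false,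
    Int.toNat_one]
  obtain ⟨tail, htail⟩ := pv_somax_go_one line.toList (line.toList.length + 1) [] []
    (Nat.lt_succ_self _)
  rw [htail]
  simp

-- ==== B's fold = pvTok ====

lemma pv_fold_tok (cs : List Char) : ∀ (toks : List String) (buf : List Char) (inC : Bool),
    (let fin := cs.foldl
      (fun (s : List String × List Char × Bool) ch =>
        let tokens := s.1
        let buf := s.2.1
        let in_comment := s.2.2
        if pvLineEnd ch then
          ((if buf.isEmpty then tokens else tokens ++ [String.ofList buf]), [], false)
        else if in_comment then s
        else if ch = '#' then
          ((if buf.isEmpty then tokens else tokens ++ [String.ofList buf]), [], true)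
        else if ch = ',' || PySem.Chars.isspace ch then
          ((if buf.isEmpty then tokens else tokens ++ [String.ofList buf]), [], in_comment)
        else (tokens, buf ++ [ch], in_comment))
      (toks, buf, inC)
     if fin.2.1.isEmpty then fin.1 else fin.1 ++ [String.ofList fin.2.1]) =
    toks ++ (pvTok cs buf inC).map String.ofList := by
  induction cs with
  | nil =>
    intro toks buf inC
    by_cases hb : buf.isEmpty <;> simp [pvTok, hb]
  | cons c cs ih =>
    intro toks buf inC
    simp only [List.foldl_cons]
    by_cases h1 : pvLineEnd c
    · simp only [h1, if_true, pvTok]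
      rw [ih]
      by_cases hb : buf.isEmpty <;> simp [hb]
    · have h1' : pvLineEnd c = false := by simpa using h1
      by_cases h2 : inC
      · subst h2
        simp only [pvTok, h1', Bool.false_eq_true, if_false, if_true]
        rw [ih]
      · have h2' : inC = false := by simpa using h2
        subst h2'
        by_cases h3 : c = '#'
        · subst h3
          simp only [pvTok, h1', Bool.false_eq_true, if_false, if_true]
          rw [ih]
          by_cases hb : buf.isEmpty <;> simp [hb]
        · by_cases h4 : (c = ',' || PySem.Chars.isspace c)
          · simp only [pvTok, h1', Bool.false_eq_true, if_false, if_neg h3, h4, if_true]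
            rw [ih]
            by_cases hb : buf.isEmpty <;> simp [hb]
          · have h4' : (c = ',' || PySem.Chars.isspace c) = false := by simpa using h4
            simp only [pvTok, h1', h4', Bool.false_eq_true, if_false, if_neg h3]
            rw [ih]

-- ==== the main invariant ====

def pvWordOK (buf : List Char) : Prop :=
  ∀ c ∈ buf, PySem.Chars.isspace c = false ∧ c ≠ ',' ∧ c ≠ '#'

lemma pv_map_pvR_word (buf : List Char) (h : pvWordOK buf) : buf.map pvR = buf := by
  induction buf with
  | nil => rfl
  | cons c t ih =>
    have hc := h c (by simp)
    rw [List.map_cons, show pvR c = c from by simp [pvR, hc.2.1],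
      ih (fun d hd => h d (by simp [hd]))]

lemma pv_takeWhile_word_append (buf : List Char) (h : pvWordOK buf) (x : List Char) :
    (buf ++ x).takeWhile (· ≠ '#') = buf ++ x.takeWhile (· ≠ '#') := by
  induction buf with
  | nil => rfl
  | cons c t ih =>
    have hc := h c (by simp)
    have hct : decide (c ≠ '#') = true := by simp [hc.2.2]
    simp only [List.cons_append, List.takeWhile_cons, hct, if_true]
    rw [ih (fun d hd => h d (by simp [hd]))]

lemma pv_g_word (buf : List Char) (h : pvWordOK buf) :
    pvG buf = if buf.isEmpty then [] else [buf] := by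
  unfold pvG
  rw [List.takeWhile_eq_self_iff.mpr (fun c hc => by simpa using (h c hc).2.2),
    pv_map_pvR_word buf h, pv_split0_word buf (fun c hc => (h c hc).1)]

lemma pv_g_word_append_delim (buf : List Char) (h : pvWordOK buf) (c : Char)
    (hc : (c = ',' || PySem.Chars.isspace c) = true) (l : List Char) :
    pvG (buf ++ c :: l) = (if buf.isEmpty then [] else [buf]) ++ pvG l := by
  have hch : decide (c ≠ '#') = true := by
    rcases Bool.or_eq_true_iff.mp hc with h1 | h1
    · simp [of_decide_eq_true h1]
    · simp; intro he; exact absurd (he ▸ h1) (by decide)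
  have hsp : PySem.Chars.isspace (pvR c) = true := by
    by_cases hcc : c = ','
    · rw [show pvR c = ' ' from by simp [pvR, hcc]]; decide
    · rw [show pvR c = c from by simp [pvR, hcc]]
      rcases Bool.or_eq_true_iff.mp hc with h1 | h1
      · exact absurd (of_decide_eq_true h1) hcc
      · exact h1
  unfold pvG
  rw [pv_takeWhile_word_append buf h]
  simp only [List.takeWhile_cons, hch, if_true, List.map_append, List.map_cons,
    pv_map_pvR_word buf h]
  rw [pv_split0_append_space hsp buf _, pv_split0_word buf (fun d hd => (h d hd).1)]

lemma pv_g_word_append_hash (buf : List Char) (h : pvWordOK buf) (l : List Char) :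
    pvG (buf ++ '#' :: l) = if buf.isEmpty then [] else [buf] := by
  unfold pvG
  rw [pv_takeWhile_word_append buf h]
  have hh : decide ('#' ≠ '#') = false := by simp
  simp only [List.takeWhile_cons, hh, Bool.false_eq_true, if_false, List.append_nil,
    pv_map_pvR_word buf h]
  rw [pv_split0_word buf (fun d hd => (h d hd).1)]

lemma pv_head_cons_nb (c : Char) (cs : List Char) (h : pvIsB c = false) :
    pvHead (c :: cs) = c :: pvHead cs := by simp [pvHead, h]

lemma pv_after_cons_nb (c : Char) (cs : List Char) (h : pvIsB c = false) :
    pvAfter (c :: cs) = pvAfter cs := by simp [pvAfter, h]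

lemma pv_after_cons_le (c : Char) (cs : List Char) (h : pvIsB c = true)
    (h2 : c = '\r' → ∀ r', cs ≠ '\n' :: r') : pvAfter (c :: cs) = cs := by
  simp only [pvAfter, List.dropWhile_cons, h, Bool.not_true, Bool.false_eq_true, if_false]
  exact pv_sep_cons c cs h2

lemma pv_F_after_le (c : Char) (cs : List Char) (h : pvIsB c = true) :
    pvF (pvAfter (c :: cs)) = pvF cs := by
  by_cases hrn : c = '\r' ∧ ∃ r', cs = '\n' :: r'
  · obtain ⟨rfl, r', rfl⟩ := hrn
    rw [show pvAfter ('\r' :: '\n' :: r') = r' from by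
      simp [pvAfter, show pvIsB '\r' = true from rfl, pvSep]]
    rw [← pvF_head_after ('\n' :: r'),
      show pvHead ('\n' :: r') = [] from by simp [pvHead, show pvIsB '\n' = true from rfl],
      show pvAfter ('\n' :: r') = r' from by
        unfold pvAfter
        rw [show List.dropWhile (fun c => !pvIsB c) ('\n' :: r') = '\n' :: r' from by
          simp [show pvIsB '\n' = true from rfl]]
        exact pv_sep_cons '\n' r' (fun hc => absurd hc (by decide)),
      pvG_nil]
    simp
  · rw [pv_after_cons_le c cs h (fun hc r' hr => hrn ⟨hc, r', hr⟩)]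

lemma pv_tok_step_le (c : Char) (cs : List Char) (buf : List Char) (inC : Bool)
    (h1 : pvLineEnd c = true) :
    pvTok (c :: cs) buf inC = (if buf.isEmpty then [] else [buf]) ++ pvTok cs [] false := by
  simp [pvTok, h1]

lemma pv_main (cs : List Char) :
    (∀ buf, pvWordOK buf → pvTok cs buf false = pvG (buf ++ pvHead cs) ++ pvF (pvAfter cs)) ∧
    (pvTok cs [] true = pvF (pvAfter cs)) := by
  induction cs with
  | nil =>
    constructor
    · intro buf hb
      simp only [pvHead, pvAfter, List.takeWhile_nil, List.dropWhile_nil, pvSep,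
        List.append_nil, pvF_nil]
      rw [show pvTok [] buf false = (if buf.isEmpty then [] else [buf]) from rfl,
        pv_g_word buf hb]
    · simp [pvTok, pvAfter, pvSep, pvF_nil]
  | cons c cs ih =>
    constructor
    · intro buf hb
      by_cases h1 : pvLineEnd c
      · have hib : pvIsB c = true := (pv_lineEnd_eq c) ▸ h1
        rw [pv_tok_step_le c cs buf false h1, ih.1 [] (by intro d hd; simp at hd),
          List.nil_append,
          show pvHead (c :: cs) = [] from by simp [pvHead, hib],
          List.append_nil, pv_g_word buf hb, pvF_head_after cs, pv_F_after_le c cs hib]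
      · have h1' : pvLineEnd c = false := by simpa using h1
        have hib : pvIsB c = false := (pv_lineEnd_eq c) ▸ h1'
        by_cases h3 : c = '#'
        · subst h3
          rw [show pvTok ('#' :: cs) buf false
              = (if buf.isEmpty then [] else [buf]) ++ pvTok cs [] true from by
            simp [pvTok, h1'], ih.2,
            pv_head_cons_nb _ _ hib, pv_after_cons_nb _ _ hib,
            pv_g_word_append_hash buf hb (pvHead cs)]
        · by_cases h4 : (c = ',' || PySem.Chars.isspace c) = true
          · rw [show pvTok (c :: cs) buf false
                = (if buf.isEmpty then [] else [buf]) ++ pvTok cs [] false from by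
              simp [pvTok, h1', if_neg h3, h4], ih.1 [] (by intro d hd; simp at hd),
              List.nil_append, pv_head_cons_nb _ _ hib, pv_after_cons_nb _ _ hib,
              pv_g_word_append_delim buf hb c h4 (pvHead cs)]
            simp [List.append_assoc]
          · have h4' : (c = ',' || PySem.Chars.isspace c) = false := by simpa using h4
            have hw : pvWordOK (buf ++ [c]) := by
              intro d hd
              rcases List.mem_append.mp hd with hd | hd
              · exact hb d hd
              · simp at hd; subst hd
                refine ⟨by simpa using (Bool.or_eq_false_iff.mp h4').2, ?_, h3⟩
                intro hdc
                exact absurd (by simp [hdc] : (d = ',' || PySem.Chars.isspace d) = true)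
                  (by simp [h4'])
            rw [show pvTok (c :: cs) buf false = pvTok cs (buf ++ [c]) false from by
              simp [pvTok, h1', if_neg h3, h4'], ih.1 (buf ++ [c]) hw,
              pv_head_cons_nb _ _ hib, pv_after_cons_nb _ _ hib]
            simp
    · by_cases h1 : pvLineEnd c
      · have hib : pvIsB c = true := (pv_lineEnd_eq c) ▸ h1
        rw [pv_tok_step_le c cs [] true h1, ih.1 [] (by intro d hd; simp at hd),
          List.nil_append, pvF_head_after cs, pv_F_after_le c cs hib]
        simp
      · have h1' : pvLineEnd c = false := by simpa using h1
        have hib : pvIsB c = false := (pv_lineEnd_eq c) ▸ h1'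
        rw [show pvTok (c :: cs) [] true = pvTok cs [] true from by simp [pvTok, h1'],
          ih.2, pv_after_cons_nb _ _ hib]

-- ===== VERDICT (by name: the statement is the Claim_ definition above) =====
set_option maxHeartbeats 1000000 in
theorem view_tokens_from_text_py_spec : Claim_equal_view_tokens_from_text_py := by
  intro text _
  unfold Spec_view_tokens_from_text_py
  have hB : view_tokens_from_text_py_alt text = (pvF text.toList).map String.ofList := by
    unfold view_tokens_from_text_py_alt
    rw [pv_fold_tok text.toList [] [] false, List.nil_append,
      (pv_main text.toList).1 [] (by intro d hd; simp at hd), List.nil_append,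
      pvF_head_after text.toList]
  have hline : ∀ (l : String), PySem.Str.split₀ (PySem.Str.replace (pvStripComment l) "," " ")
      = (pvG l.toList).map String.ofList := by
    intro l
    rw [show PySem.Str.replace (pvStripComment l) "," " "
        = String.ofList ((pvStripComment l).toList.map pvR) from by
      unfold PySem.Str.replace
      rw [show (",".toList) = [','] from rfl, show (" ".toList) = [' '] from rfl,
        pv_replace_eq_map]]
    unfold PySem.Str.split₀
    rw [show (String.ofList ((pvStripComment l).toList.map pvR)).toList
        = (pvStripComment l).toList.map pvR from by simp, pv_stripComment_toList]
    rfl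
  have hA : view_tokens_from_text_py text = (pvF text.toList).map String.ofList := by
    unfold view_tokens_from_text_py
    rw [show (fun (tokens : List String) line0 =>
        let line := pvStripComment line0
        if PySem.Str.strip line = "" then tokens
        else tokens ++ (PySem.Str.split₀ (PySem.Str.replace line "," " ")).filter
          (fun part => part != ""))
      = (fun (tokens : List String) line0 =>
          tokens ++ PySem.Str.split₀ (PySem.Str.replace (pvStripComment line0) "," " ")) from by
        funext toks line0
        show (if PySem.Str.strip (pvStripComment line0) = "" then toks
              else toks ++ (PySem.Str.split₀
                (PySem.Str.replace (pvStripComment line0) "," " ")).filter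
                  (fun part => part != ""))
            = toks ++ PySem.Str.split₀ (PySem.Str.replace (pvStripComment line0) "," " ")
        rw [← pv_line_tokens (pvStripComment line0)]
        by_cases hb : PySem.Str.strip (pvStripComment line0) = "" <;> simp [hb]]
    rw [PySem.List.foldl_append_eq_flatMap
      (fun line0 => PySem.Str.split₀ (PySem.Str.replace (pvStripComment line0) "," " "))
      (PySem.Str.splitlines text) [], List.nil_append]
    simp only [hline]
    rw [show PySem.Str.splitlines text
        = (PySem.Chars.splitlines text.toList).map String.ofList from rfl,
      List.flatMap_map]
    simp only [show ∀ (l : List Char), (String.ofList l).toList = l from fun l => by simp]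
    rw [← List.map_flatMap]
    rfl
  rw [hA, hB]
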